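-- pv_equiv track=rewrite | github.com/halflearned/rlvr-experiments | src/rlvr_experiments/verifiers/ifbench.py | check_following
-- ===== SOURCE A (Python) =====
-- def check_following(value):
--     words = value.lower().strip().split()
--     consonants = set("bcdfghjklmnpqrstvwxyz")
--     for word in words:
--         cluster = False
--         for i in range(len(word) - 1):
--             if word[i] in consonants and word[i + 1] in consonants:
--                 cluster = True
--                 break
--         if not cluster:
--             return False
--     return True
-- ===== SOURCE B (Python) =====
-- def check_following(value):
--     consonants = set("bcdfghjklmnpqrstvwxyz")
--     in_word = False
--     prev_cons = False
--     has_pair = False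
--     for ch in value:
--         if ch.isspace():
--             if in_word and not has_pair:
--                 return False
--             in_word, prev_cons, has_pair = False, False, False
--         else:
--             is_cons = ch.lower() in consonants
--             has_pair = has_pair or (prev_cons and is_cons)
--             prev_cons = is_cons
--             in_word = True
--     return not in_word or has_pair
-- ===== Notes on version B (the rewrite author's own statement) =====
-- stated objective: alternative
-- what changed: A lowercases, strips and splits the string into a word list and runs a nested index loop per word; B makes a single left-to-right pass over the raw characters with a three-flag state machine (in_word, prev_cons, has_pair) and no intermediate word list.
import Mathlib
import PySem

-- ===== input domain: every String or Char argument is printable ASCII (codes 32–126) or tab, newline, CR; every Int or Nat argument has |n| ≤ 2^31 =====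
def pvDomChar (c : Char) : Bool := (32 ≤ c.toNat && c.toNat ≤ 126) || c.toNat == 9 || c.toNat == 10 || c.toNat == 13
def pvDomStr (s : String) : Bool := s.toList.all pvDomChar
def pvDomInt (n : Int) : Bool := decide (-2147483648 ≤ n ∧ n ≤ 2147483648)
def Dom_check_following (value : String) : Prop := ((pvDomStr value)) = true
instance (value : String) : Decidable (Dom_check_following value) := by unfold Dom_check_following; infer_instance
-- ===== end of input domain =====

-- B replaces A's lower/strip/split plus per-word index loop by a single left-to-right
-- state-machine pass over the characters (no intermediate word list); same return value.

-- ===== PORT A =====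
-- consonants = set("bcdfghjklmnpqrstvwxyz")
def pvConsonants : PySem.Set Char := PySem.Set.ofList "bcdfghjklmnpqrstvwxyz".toList

-- inner loop: for i in range(len(word) - 1): if word[i] in consonants and word[i+1] in consonants: cluster = True; break
def aCluster (word : List Char) (i : Nat) : Bool :=
  if _h : i + 1 < word.length then
    if pvConsonants.contains (word.getD i ' ') && pvConsonants.contains (word.getD (i + 1) ' ') then
      true
    else aCluster word (i + 1)
  else false
termination_by word.length - i

-- outer loop: for word in words: … if not cluster: return False / … return True
def aWords : List (List Char) → Bool
  | [] => true
  | w :: ws => if aCluster w 0 then aWords ws else false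

-- words = value.lower().strip().split()
def check_following (value : String) : Bool :=
  aWords (PySem.Chars.split₀ (PySem.Chars.strip (PySem.Chars.lower value.toList)))

-- ===== PORT B =====
-- is_cons = ch.lower() in consonants
def bIsCons (c : Char) : Bool := pvConsonants.contains (PySem.Chars.lowerChar c)

-- one pass over the characters with state (in_word, prev_cons, has_pair);
-- early `return False` at a word boundary becomes the `false` branch
def bGo : List Char → Bool → Bool → Bool → Bool
  | [], inWord, _, hasPair => !inWord || hasPair
  | c :: cs, inWord, prevCons, hasPair =>
    if PySem.Chars.isspace c then
      if inWord && !hasPair then false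
      else bGo cs false false false
    else
      let k := bIsCons c
      bGo cs true k (hasPair || (prevCons && k))

def check_following_alt (value : String) : Bool := bGo value.toList false false false

-- ===== PRECONDITION & SPEC =====
def Spec_check_following (value : String) (out : Bool) : Prop := out = check_following_alt value
instance (value : String) (out : Bool) : Decidable (Spec_check_following value out) := by unfold Spec_check_following; infer_instance

-- ===== CLAIM (what is proved, stated in full; the proofs are below) =====
def Claim_equal_check_following : Prop := ∀ (value : String), Dom_check_following value → Spec_check_following value (check_following value)

-- ===== LEMMAS AND PROOFS =====

-- "word contains two adjacent consonants", the common ground of both ports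
def pairScan : List Char → Bool
  | a :: b :: t => (pvConsonants.contains a && pvConsonants.contains b) || pairScan (b :: t)
  | _ => false

-- consonant-ness of the most recently pushed character of the (reversed) current word
def headCons : List Char → Bool
  | [] => false
  | c :: _ => pvConsonants.contains c

lemma aCluster_eq_pairScan_drop (word : List Char) (i : Nat) :
    aCluster word i = pairScan (word.drop i) := by
  fun_induction aCluster word i with
  | case1 i h hc =>
    rw [List.drop_eq_getElem_cons (by omega), List.drop_eq_getElem_cons (by omega)]
    simp only [pairScan]
    simp [List.getD_eq_getElem?_getD, List.getElem?_eq_getElem (by omega : i < word.length),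
      List.getElem?_eq_getElem (by omega : i+1 < word.length)] at hc
    simp [hc]
  | case2 i h hc ih =>
    rw [ih, List.drop_eq_getElem_cons (by omega : i < word.length),
      List.drop_eq_getElem_cons (by omega : i+1 < word.length)]
    conv_rhs => rw [pairScan]
    simp [List.getD_eq_getElem?_getD, List.getElem?_eq_getElem (by omega : i < word.length),
      List.getElem?_eq_getElem (by omega : i+1 < word.length)] at hc
    have hA : (pvConsonants.contains word[i] && pvConsonants.contains word[i + 1]) = false := by
      by_cases h1 : word[i] ∈ pvConsonants
      · simp [hc h1]
      · simp [h1]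
    rw [hA, Bool.false_or]
  | case3 i h =>
    match w : word.drop i with
    | [] => simp [pairScan]
    | [a] => simp [pairScan]
    | a :: b :: t =>
      exfalso
      have := congrArg List.length w
      simp at this; omega

lemma pairScan_append_singleton (l : List Char) (x : Char) :
    pairScan (l ++ [x]) = (pairScan l || (headCons l.reverse && pvConsonants.contains x)) := by
  induction l with
  | nil => simp [pairScan, headCons]
  | cons a l ih =>
    cases l with
    | nil => simp [pairScan, headCons]
    | cons b t =>
      simp only [List.cons_append] at *
      rw [pairScan, ih, pairScan]
      have : headCons ((b :: t).reverse) = headCons ((a :: b :: t).reverse) := by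
        cases ht : t.reverse with
        | nil => simp [List.reverse_cons, ht, headCons]
        | cons c r => simp [List.reverse_cons, ht, headCons]
      rw [this]
      cases pairScan (b :: t) <;> cases (pvConsonants.contains a && pvConsonants.contains b) <;> simp

lemma pairScan_reverse (l : List Char) : pairScan l.reverse = pairScan l := by
  induction l with
  | nil => rfl
  | cons a l ih =>
    rw [List.reverse_cons, pairScan_append_singleton, ih, List.reverse_reverse]
    cases l with
    | nil => simp [pairScan, headCons]
    | cons b t =>
      rw [pairScan]
      simp only [headCons]
      cases pairScan (b :: t) <;> cases pvConsonants.contains a <;> cases pvConsonants.contains b <;> simp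

lemma go_nil (cur : List Char) (acc : List (List Char)) :
    PySem.Chars.split₀.go [] cur acc
      = (if cur.isEmpty then acc.reverse else (cur.reverse :: acc).reverse) := by
  rfl

lemma go_cons (c : Char) (rest cur : List Char) (acc : List (List Char)) :
    PySem.Chars.split₀.go (c :: rest) cur acc
      = (if PySem.Chars.isspace c then
          if cur.isEmpty then PySem.Chars.split₀.go rest [] acc
          else PySem.Chars.split₀.go rest [] (cur.reverse :: acc)
        else PySem.Chars.split₀.go rest (c :: cur) acc) := by
  rfl

lemma go_acc (cs cur : List Char) (acc : List (List Char)) :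
    PySem.Chars.split₀.go cs cur acc = acc.reverse ++ PySem.Chars.split₀.go cs cur [] := by
  induction cs generalizing cur acc with
  | nil =>
    rw [go_nil, go_nil]
    cases cur <;> simp
  | cons c rest ih =>
    rw [go_cons, go_cons]
    by_cases hs : PySem.Chars.isspace c
    · by_cases hc : cur.isEmpty
      · rw [if_pos hs, if_pos hs, if_pos hc, if_pos hc, ih [] acc]
      · rw [if_pos hs, if_pos hs, if_neg hc, if_neg hc,
          ih [] (cur.reverse :: acc), ih [] [cur.reverse]]
        simp
    · rw [if_neg hs, if_neg hs, ih (c :: cur) acc]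

lemma go_spaces (sp cur : List Char) (acc : List (List Char))
    (hsp : sp.all PySem.Chars.isspace = true) :
    PySem.Chars.split₀.go sp cur acc = PySem.Chars.split₀.go [] cur acc := by
  induction sp generalizing cur acc with
  | nil => rfl
  | cons c sp ih =>
    simp only [List.all_cons, Bool.and_eq_true] at hsp
    rw [go_cons, if_pos hsp.1]
    by_cases hc : cur.isEmpty
    · rw [if_pos hc, ih _ _ hsp.2, go_nil, go_nil, if_pos hc]
      simp
    · rw [if_neg hc, ih _ _ hsp.2, go_nil, go_nil, if_neg hc]
      simp

lemma go_append_spaces (cs sp cur : List Char) (acc : List (List Char))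
    (hsp : sp.all PySem.Chars.isspace = true) :
    PySem.Chars.split₀.go (cs ++ sp) cur acc = PySem.Chars.split₀.go cs cur acc := by
  induction cs generalizing cur acc with
  | nil => simpa using go_spaces sp cur acc hsp
  | cons c rest ih =>
    rw [List.cons_append, go_cons, go_cons]
    by_cases hs : PySem.Chars.isspace c
    · by_cases hc : cur.isEmpty <;> simp [hs, hc, ih]
    · simp [hs, ih]

lemma go_dropWhile (cs : List Char) (acc : List (List Char)) :
    PySem.Chars.split₀.go (cs.dropWhile PySem.Chars.isspace) [] acc
      = PySem.Chars.split₀.go cs [] acc := by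
  induction cs with
  | nil => rfl
  | cons c rest ih =>
    by_cases hs : PySem.Chars.isspace c
    · rw [List.dropWhile_cons_of_pos hs, go_cons, if_pos hs]
      simp [ih]
    · rw [List.dropWhile_cons_of_neg (by simp [hs])]

-- .strip() before .split() changes nothing
lemma split₀_strip (xs : List Char) :
    PySem.Chars.split₀ (PySem.Chars.strip xs) = PySem.Chars.split₀ xs := by
  unfold PySem.Chars.split₀ PySem.Chars.strip PySem.Chars.rstrip PySem.Chars.lstrip
  rw [← go_dropWhile xs]
  set ys := xs.dropWhile PySem.Chars.isspace with hys
  have hdecomp : ys = (ys.reverse.dropWhile PySem.Chars.isspace).reverse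
      ++ (ys.reverse.takeWhile PySem.Chars.isspace).reverse := by
    conv_lhs => rw [← ys.reverse_reverse,
      ← List.takeWhile_append_dropWhile (p := PySem.Chars.isspace) (l := ys.reverse)]
    rw [List.reverse_append]
  conv_rhs => rw [hdecomp]
  rw [go_append_spaces]
  simp only [List.all_eq_true, List.mem_reverse]
  intro c hc
  exact List.mem_takeWhile_imp hc

-- .lower() maps A–Z into a–z and fixes everything else, so it never changes isspace
lemma isspace_lowerChar (c : Char) :
    PySem.Chars.isspace (PySem.Chars.lowerChar c) = PySem.Chars.isspace c := by
  unfold PySem.Chars.lowerChar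
  by_cases hu : PySem.Chars.isupper c
  · rw [if_pos hu]
    unfold PySem.Chars.isupper at hu
    simp only [Bool.and_eq_true, decide_eq_true_eq] at hu
    have h1 : 65 ≤ c.toNat := hu.1
    have h2 : c.toNat ≤ 90 := hu.2
    have hval : (Char.ofNat (c.toNat + 32)).toNat = c.toNat + 32 := by
      unfold Char.ofNat
      rw [dif_pos (by left; omega)]
      rfl
    unfold PySem.Chars.isspace
    simp only [hval]
    trans false
    · rw [Bool.eq_false_iff]
      intro hh
      simp only [Bool.or_eq_true, Bool.and_eq_true, decide_eq_true_eq] at hh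
      omega
    · symm
      rw [Bool.eq_false_iff]
      intro hh
      simp only [Bool.or_eq_true, Bool.and_eq_true, decide_eq_true_eq] at hh
      omega
  · rw [if_neg hu]

lemma aWords_eq_all (ws : List (List Char)) : aWords ws = ws.all (fun w => aCluster w 0) := by
  induction ws with
  | nil => rfl
  | cons w ws ih => cases h : aCluster w 0 <;> simp [aWords, h, ih]

lemma aWords_eq_all_pairScan (ws : List (List Char)) : aWords ws = ws.all pairScan := by
  rw [aWords_eq_all]
  congr 1
  funext w
  rw [aCluster_eq_pairScan_drop, List.drop_zero]

-- main simulation: split₀.go on the lowered characters vs B's state machine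
lemma sim (cs cur : List Char) (acc : List (List Char))
    (hacc : acc.all pairScan = true) :
    aWords (PySem.Chars.split₀.go (cs.map PySem.Chars.lowerChar) cur acc)
      = bGo cs (!cur.isEmpty) (headCons cur) (pairScan cur) := by
  induction cs generalizing cur acc with
  | nil =>
    rw [List.map_nil, go_nil]
    cases cur with
    | nil => simp [aWords_eq_all_pairScan, bGo, hacc]
    | cons a t =>
      simp only [List.isEmpty_cons, bGo, Bool.not_false]
      rw [if_neg (by simp)]
      rw [aWords_eq_all_pairScan]
      simp only [List.all_reverse, List.all_cons, pairScan_reverse, hacc, Bool.and_true]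
      simp
  | cons c rest ih =>
    rw [List.map_cons, go_cons, isspace_lowerChar]
    by_cases hs : PySem.Chars.isspace c
    · rw [if_pos hs]
      conv_rhs => rw [bGo]
      rw [if_pos hs]
      cases cur with
      | nil =>
        simp only [List.isEmpty_nil]
        rw [if_pos trivial, if_neg (by simp [pairScan])]
        simpa using ih [] acc hacc
      | cons a t =>
        rw [if_neg (by simp)]
        simp only [List.isEmpty_cons, Bool.not_false, Bool.true_and]
        by_cases hp : pairScan (a :: t) = true
        · rw [hp]
          rw [if_neg (by simp)]
          have hacc' : ((a :: t).reverse :: acc).all pairScan = true := by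
            rw [List.all_cons, pairScan_reverse, hp, hacc]
            rfl
          simpa using ih [] _ hacc'
        · rw [Bool.eq_false_iff.mpr hp]
          rw [if_pos (by simp)]
          rw [go_acc, aWords_eq_all_pairScan]
          simp only [List.all_append, List.all_reverse, List.all_cons, pairScan_reverse]
          rw [Bool.eq_false_iff.mpr hp]
          simp
    · rw [if_neg hs]
      conv_rhs => rw [bGo]
      rw [if_neg hs]
      have h1 : headCons (PySem.Chars.lowerChar c :: cur) = bIsCons c := by
        simp [headCons, bIsCons]
      have h2 : pairScan (PySem.Chars.lowerChar c :: cur)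
          = (pairScan cur || (headCons cur && bIsCons c)) := by
        cases cur with
        | nil => simp [pairScan, headCons]
        | cons a t =>
          rw [pairScan]
          simp only [headCons, bIsCons]
          cases pairScan (a :: t) <;> cases pvConsonants.contains (PySem.Chars.lowerChar c) <;>
            cases pvConsonants.contains a <;> simp
      rw [ih (PySem.Chars.lowerChar c :: cur) acc hacc, h1, h2]
      simp

-- ===== VERDICT (by name: the statement is the Claim_ definition above) =====
theorem check_following_spec : Claim_equal_check_following := by
  intro value _hdom
  unfold Spec_check_following check_following check_following_alt
  rw [split₀_strip]
  unfold PySem.Chars.split₀ PySem.Chars.lower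
  simpa [pairScan, headCons] using sim value.toList [] [] rfl
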